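-- pv_equiv track=rewrite | github.com/pypi-data/pypi-mirror-7 | packages/click/click-0.3.tar.gz/click-0.3/click/utils.py | make_default_short_help
-- ===== SOURCE A (Python) =====
-- def make_default_short_help(help, max_length=45):
--     words = help.split()
--     total_length = 0
--     result = []
--     done = False
--
--     for word in words:
--         if '.' in word:
--             word = word.split('.', 1)[0] + '.'
--             done = True
--         new_length = result and 1 + len(word) or len(word)
--         if total_length + new_length > max_length:
--             result.append('...')
--             done = True
--         else:
--             if result:
--                 result.append(' ')
--             result.append(word)
--         if done:
--             break
--         total_length += new_length
--
--     return ''.join(result)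
-- ===== SOURCE B (Python) =====
-- def make_default_short_help(help, max_length=45):
--     # Pass 1: truncate the word list at the first word containing '.',
--     # that word cut down to its first sentence plus the dot.
--     words = help.split()
--     for i, w in enumerate(words):
--         if '.' in w:
--             words = words[:i] + [w.split('.', 1)[0] + '.']
--             break
--     # Pass 2: count how many leading words fit (a word after the first costs
--     # one extra for the separating space).
--     k = 0
--     acc = 0
--     for w in words:
--         acc += len(w) + (1 if k else 0)
--         if acc > max_length:
--             break
--         k += 1
--     out = ' '.join(words[:k])
--     if k < len(words):
--         out += '...'
--     return out
-- ===== Notes on version B (the rewrite author's own statement) =====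
-- stated objective: alternative
-- what changed: A's single stateful loop (done flag, running total, interleaved word/space/ellipsis list joined at the end) is re-decomposed into two independent passes - truncate the word list at the first sentence-ending word, then count how many leading words fit - followed by a single space-join plus an optional ellipsis suffix.
import Mathlib
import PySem

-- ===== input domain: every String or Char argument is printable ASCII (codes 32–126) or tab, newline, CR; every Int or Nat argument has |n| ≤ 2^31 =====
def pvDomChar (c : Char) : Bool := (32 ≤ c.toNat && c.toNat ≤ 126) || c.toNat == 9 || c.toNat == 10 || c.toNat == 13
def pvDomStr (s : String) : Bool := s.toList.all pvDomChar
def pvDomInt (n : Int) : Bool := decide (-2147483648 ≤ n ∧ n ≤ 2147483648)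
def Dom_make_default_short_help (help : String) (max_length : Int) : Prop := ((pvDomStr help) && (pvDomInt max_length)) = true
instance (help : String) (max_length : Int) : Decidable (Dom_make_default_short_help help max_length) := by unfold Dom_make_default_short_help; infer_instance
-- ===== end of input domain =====

-- B re-decomposes A's single stateful loop into two passes (truncate the word list at the
-- first '.'-word, then count how many leading words fit) plus one join; same return value.

-- ===== PORT A =====
-- A's loop: state (total_length, result, done); `word.split('.', 1)[0]` is the head of
-- splitOnMax (never empty for a nonempty separator, so `.headD []` is exact);
-- `'.' in word` is Chars.isIn; the `result and 1+len or len` idiom is the if below.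
def pvALoop (max_length : Int) : List (List Char) → Int → List (List Char) → List (List Char)
  | [], _, result => result
  | w :: ws, total_length, result =>
    let word := if PySem.Chars.isIn ['.'] w
      then (PySem.Chars.splitOnMax w ['.'] 1).headD [] ++ ['.'] else w
    let done := PySem.Chars.isIn ['.'] w
    let new_length : Int :=
      if result.isEmpty then PySem.Chars.len word else 1 + PySem.Chars.len word
    if total_length + new_length > max_length then
      result ++ [['.', '.', '.']]
    else
      let result' := (if result.isEmpty then result else result ++ [[' ']]) ++ [word]
      if done then result' else pvALoop max_length ws (total_length + new_length) result'

def make_default_short_help (help : String) (max_length : Int) : String :=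
  String.ofList (PySem.Chars.join [] (pvALoop max_length (PySem.Chars.split₀ help.toList) 0 []))

-- ===== PORT B =====
-- B pass 1: cut the word list at the first word containing '.', that word truncated.
def pvTrunc : List (List Char) → List (List Char)
  | [] => []
  | w :: ws =>
    if PySem.Chars.isIn ['.'] w
      then [(PySem.Chars.splitOnMax w ['.'] 1).headD [] ++ ['.']]
      else w :: pvTrunc ws

-- B pass 2: count how many leading words fit; each word after the first costs one extra
-- character for its separating space.
def pvFit (max_length : Int) : List (List Char) → Nat → Int → Nat
  | [], k, _ => k
  | w :: ws, k, acc =>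
    let acc' := acc + PySem.Chars.len w + (if k = 0 then 0 else 1)
    if max_length < acc' then k else pvFit max_length ws (k + 1) acc'

def make_default_short_help_alt (help : String) (max_length : Int) : String :=
  let words := pvTrunc (PySem.Chars.split₀ help.toList)
  let k := pvFit max_length words 0 0
  let out := PySem.Chars.join [' '] (words.take k)
  String.ofList (if k < words.length then out ++ ['.', '.', '.'] else out)

-- ===== PRECONDITION & SPEC =====
def Spec_make_default_short_help (help : String) (max_length : Int) (out : String) : Prop := out = make_default_short_help_alt help max_length
instance (help : String) (max_length : Int) (out : String) : Decidable (Spec_make_default_short_help help max_length out) := by unfold Spec_make_default_short_help; infer_instance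

-- ===== CLAIM (what is proved, stated in full; the proofs are below) =====
def Claim_equal_make_default_short_help : Prop := ∀ (help : String) (max_length : Int), Dom_make_default_short_help help max_length → Spec_make_default_short_help help max_length (make_default_short_help help max_length)

-- ===== LEMMAS AND PROOFS =====

-- Proof-side functional: what A's loop appends (joined), over an already-truncated list.
def pvF (ml : Int) : List (List Char) → Int → Bool → List Char
  | [], _, _ => []
  | w :: ws, t, ne =>
    let c : Int := if ne then 1 + PySem.Chars.len w else PySem.Chars.len w
    if t + c > ml then ['.', '.', '.']
    else (if ne then [' '] else []) ++ w ++ pvF ml ws (t + c) true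

-- Proof-side count: how many leading words fit.
def pvCount (ml : Int) : List (List Char) → Int → Bool → Nat
  | [], _, _ => 0
  | w :: ws, t, ne =>
    let c : Int := if ne then 1 + PySem.Chars.len w else PySem.Chars.len w
    if t + c > ml then 0 else 1 + pvCount ml ws (t + c) true

lemma pv_join_nil (rs : List (List Char)) : PySem.Chars.join [] rs = rs.flatten := by
  induction rs with
  | nil => simp [PySem.Chars.join_nil]
  | cons a t ih =>
    cases t with
    | nil => simp [PySem.Chars.join_singleton]
    | cons b u => simp [PySem.Chars.join_cons_cons] at ih ⊢; simp [ih]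

lemma pv_join_sp (w : List Char) (t : List (List Char)) :
    PySem.Chars.join [' '] (w :: t)
      = w ++ (if t.isEmpty then [] else [' '] ++ PySem.Chars.join [' '] t) := by
  cases t with
  | nil => simp [PySem.Chars.join_singleton]
  | cons b u => simp [PySem.Chars.join_cons_cons]

lemma pvALoop_join (ml : Int) (ws : List (List Char)) :
    ∀ (t : Int) (result : List (List Char)),
      PySem.Chars.join [] (pvALoop ml ws t result)
        = PySem.Chars.join [] result ++ pvF ml (pvTrunc ws) t (!result.isEmpty) := by
  induction ws with
  | nil => intro t result; simp [pvALoop, pvTrunc, pvF]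
  | cons w ws ih =>
    intro t result
    by_cases hdot : PySem.Chars.isIn ['.'] w = true <;>
        by_cases hne : result.isEmpty = true
    · simp only [pvALoop, pvTrunc, pvF, hdot, hne, if_true, Bool.not_true,
        if_neg (by simp : ¬(false = true))]
      split_ifs with h
      · simp [pv_join_nil]
      · simp [pv_join_nil]
    · have hne' : (!result.isEmpty) = true := by simp_all
      simp only [pvALoop, pvTrunc, pvF, hdot, hne', if_true, if_neg hne]
      split_ifs with h
      · simp [pv_join_nil]
      · simp [pv_join_nil]
    · simp only [pvALoop, pvTrunc, pvF, hdot, hne, if_true, Bool.not_true,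
        Bool.false_eq_true, if_false]
      split_ifs with h
      · simp [pv_join_nil]
      · rw [ih]
        have h1 : (result ++ [w]).isEmpty = false := by simp
        simp [pv_join_nil, h1]
    · have hne' : (!result.isEmpty) = true := by simp_all
      simp only [pvALoop, pvTrunc, pvF, hdot, hne', if_neg hne,
        Bool.false_eq_true, if_false, if_true]
      split_ifs with h
      · simp [pv_join_nil]
      · rw [ih]
        have h1 : (result ++ [[' '], w]).isEmpty = false := by simp
        simp [pv_join_nil, h1]

lemma pvFit_count (ml : Int) (ts : List (List Char)) :
    ∀ (k0 : Nat) (t : Int),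
      pvFit ml ts k0 t = k0 + pvCount ml ts t (!(k0 == 0)) := by
  induction ts with
  | nil => intro k0 t; simp [pvFit, pvCount]
  | cons w ws ih =>
    intro k0 t
    have hacc : t + PySem.Chars.len w + (if k0 = 0 then 0 else 1)
        = t + (if (!(k0 == 0)) = true then 1 + PySem.Chars.len w else PySem.Chars.len w) := by
      by_cases h : k0 = 0 <;> simp [h]
      ring
    simp only [pvFit, pvCount, hacc]
    split_ifs with h
    · simp
    · rw [ih]
      have : (!((k0 + 1) == 0)) = true := by simp
      rw [this]
      omega
    · omega
    · rw [ih]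
      have : (!((k0 + 1) == 0)) = true := by simp
      rw [this]
      omega

lemma pvCount_le_length (ml : Int) (ts : List (List Char)) :
    ∀ (t : Int) (ne : Bool), pvCount ml ts t ne ≤ ts.length := by
  induction ts with
  | nil => intro t ne; simp [pvCount]
  | cons w ws ih =>
    intro t ne
    simp only [pvCount, List.length_cons]
    set c : Int := if ne = true then 1 + PySem.Chars.len w else PySem.Chars.len w with hc
    by_cases h : t + c > ml
    · rw [if_pos h]; omega
    · rw [if_neg h]
      have := ih (t + c) true
      omega

lemma pvF_eq_join (ml : Int) (ts : List (List Char)) :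
    ∀ (t : Int) (ne : Bool),
      pvF ml ts t ne
        = (if ne ∧ 0 < pvCount ml ts t ne then [' '] else [])
          ++ PySem.Chars.join [' '] (ts.take (pvCount ml ts t ne))
          ++ (if pvCount ml ts t ne < ts.length then ['.', '.', '.'] else []) := by
  induction ts with
  | nil => intro t ne; simp [pvF, pvCount, PySem.Chars.join_nil]
  | cons w ws ih =>
    intro t ne
    simp only [pvF, pvCount, List.length_cons, PySem.Chars.len_eq]
    by_cases h : t + (if ne = true then 1 + (w.length:Int) else (w.length:Int)) > ml
    · simp only [if_pos h]
      simp [PySem.Chars.join_nil]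
    · simp only [if_neg h]
      rw [ih]
      by_cases hz : pvCount ml ws (t + (if ne = true then 1 + (w.length:Int) else (w.length:Int))) true = 0
      · by_cases hws : 0 < ws.length
        · simp [hz, PySem.Chars.join_nil, PySem.Chars.join_singleton, hws]
        · simp [hz, PySem.Chars.join_nil, PySem.Chars.join_singleton, hws]
      · have hpos : 0 < pvCount ml ws (t + (if ne = true then 1 + (w.length:Int) else (w.length:Int))) true := Nat.pos_of_ne_zero hz
        have hk'le : pvCount ml ws (t + (if ne = true then 1 + (w.length:Int) else (w.length:Int))) true ≤ ws.length := by
          have := pvCount_le_length ml ws (t + (if ne = true then 1 + (w.length:Int) else (w.length:Int))) true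
          simpa [PySem.Chars.len_eq] using this
        have htake : (ws.take (pvCount ml ws (t + (if ne = true then 1 + (w.length:Int) else (w.length:Int))) true)).isEmpty = false := by
          rw [List.isEmpty_eq_false_iff]
          intro hnil
          rcases List.take_eq_nil_iff.mp hnil with h' | h'
          · exact hz h'
          · rw [h'] at hpos hz
            exact hz (by simp [pvCount])
        have hflip : 1 + (pvCount ml ws (t + (if ne = true then 1 + (w.length:Int) else (w.length:Int))) true) = (pvCount ml ws (t + (if ne = true then 1 + (w.length:Int) else (w.length:Int))) true) + 1 := by omega
        simp [hflip, List.take_succ_cons, pv_join_sp, htake, hpos]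

-- ===== VERDICT (by name: the statement is the Claim_ definition above) =====
theorem make_default_short_help_spec : Claim_equal_make_default_short_help := by
  intro help ml _
  unfold Spec_make_default_short_help
  unfold make_default_short_help make_default_short_help_alt
  set ts := pvTrunc (PySem.Chars.split₀ help.toList) with hts
  have hA := pvALoop_join ml (PySem.Chars.split₀ help.toList) 0 []
  have hB := pvF_eq_join ml ts 0 false
  have hk := pvFit_count ml ts 0 0
  simp only [List.isEmpty_nil, Bool.not_true] at hA
  rw [hA, hB]
  simp only [PySem.Chars.join_nil, List.nil_append, Bool.false_eq_true, false_and, if_false]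
  rw [hk]
  simp only [show (!((0:Nat) == 0)) = false from rfl, Nat.zero_add]
  by_cases hlt : pvCount ml ts 0 false < ts.length
  · simp only [if_pos hlt]
  · simp only [if_neg hlt, List.append_nil]
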